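-- pv_equiv track=rewrite | github.com/krinalsuthar/code-translator | app.py | js_to_c
-- ===== SOURCE A (Python) =====
-- def js_to_c(js_code):
--     """Translate JavaScript code to C."""
--     replacements = {
--         "console.log(": "printf(",  # Print statements
--         "function main()": "int main()",  # Main function
--         "let ": "int ",  # Variables
--         "const ": "const ",  # Constants remain the same
--         ";": ";",  # Keep semicolons
--     }
--
--     c_code = []
--     for line in js_code.splitlines():
--         for js, c in replacements.items():
--             line = line.replace(js, c)
--         c_code.append(line.strip())
--
--     return "\n".join(c_code)
-- ===== SOURCE B (Python) =====
-- def js_to_c(js_code):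
--     """Translate JavaScript code to C (single left-to-right scan per line)."""
--     table = [
--         ("console.log(", "printf("),
--         ("function main()", "int main()"),
--         ("let ", "int "),
--     ]
--
--     def translate(line):
--         out = []
--         i = 0
--         n = len(line)
--         while i < n:
--             for js, c in table:
--                 if line.startswith(js, i):
--                     out.append(c)
--                     i += len(js)
--                     break
--             else:
--                 out.append(line[i])
--                 i += 1
--         return "".join(out)
--
--     return "\n".join(translate(line).strip() for line in js_code.splitlines())
-- ===== Notes on version B (the rewrite author's own statement) =====
-- stated objective: alternative
-- what changed: Replaces the per-line chain of five str.replace passes (each rescanning the whole line, two of them no-ops) with a single left-to-right scan per line that matches the three effective keys at each position and emits the replacement or the character.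
import Mathlib
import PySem

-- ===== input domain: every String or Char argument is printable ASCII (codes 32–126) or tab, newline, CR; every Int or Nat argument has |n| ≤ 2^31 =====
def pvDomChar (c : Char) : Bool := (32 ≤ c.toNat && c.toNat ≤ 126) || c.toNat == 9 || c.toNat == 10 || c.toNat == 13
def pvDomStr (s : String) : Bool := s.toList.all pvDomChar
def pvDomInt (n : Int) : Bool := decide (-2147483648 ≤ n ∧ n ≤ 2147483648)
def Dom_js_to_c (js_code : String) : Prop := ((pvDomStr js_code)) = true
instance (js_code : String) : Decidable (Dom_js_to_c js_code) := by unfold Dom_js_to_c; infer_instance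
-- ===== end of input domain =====

-- B replaces A's five str.replace passes per line (two of them no-ops) with one
-- left-to-right scan per line matching the three effective keys; return values proved equal.

-- ===== PORT A =====
def js_to_c (js_code : String) : String :=
  let replacements : PySem.Dict String String :=
    (((((PySem.Dict.empty.insert "console.log(" "printf(").insert
        "function main()" "int main()").insert
        "let " "int ").insert
        "const " "const ").insert
        ";" ";")
  let c_code : List String :=
    (PySem.Str.splitlines js_code).foldl (fun acc line =>
      acc ++ [PySem.Str.strip
        (replacements.items.foldl (fun l p => PySem.Str.replace l p.1 p.2) line)]) []
  PySem.Str.join "\n" c_code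

-- ===== PORT B =====
-- B's inner while loop: at each position try the three keys in order, emit the
-- replacement (skipping the key) or the single character.
def pvScan (l : List Char) : List Char :=
  match l with
  | [] => []
  | c :: t =>
    if "console.log(".toList.isPrefixOf (c :: t) then
      "printf(".toList ++ pvScan ((c :: t).drop 12)
    else if "function main()".toList.isPrefixOf (c :: t) then
      "int main()".toList ++ pvScan ((c :: t).drop 15)
    else if "let ".toList.isPrefixOf (c :: t) then
      "int ".toList ++ pvScan ((c :: t).drop 4)
    else
      c :: pvScan t
termination_by l.length
decreasing_by all_goals simp [List.length_drop]

def js_to_c_alt (js_code : String) : String :=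
  PySem.Str.join "\n"
    ((PySem.Str.splitlines js_code).map
      (fun line => PySem.Str.strip (String.ofList (pvScan line.toList))))

-- ===== PRECONDITION & SPEC =====
def Spec_js_to_c (js_code : String) (out : String) : Prop := out = js_to_c_alt js_code
instance (js_code : String) (out : String) : Decidable (Spec_js_to_c js_code out) := by unfold Spec_js_to_c; infer_instance

-- ===== CLAIM (what is proved, stated in full; the proofs are below) =====
def Claim_equal_js_to_c : Prop := ∀ (js_code : String), Dom_js_to_c js_code → Spec_js_to_c js_code (js_to_c js_code)

-- ===== LEMMAS AND PROOFS =====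

-- Fuel-free restatement of Python str.replace's left-to-right scan (for nonempty `old`).
def pvRep (old new : List Char) : List Char → List Char
  | [] => []
  | c :: t =>
    if old.isPrefixOf (c :: t) then new ++ pvRep old new (t.drop (old.length - 1))
    else c :: pvRep old new t
termination_by l => l.length
decreasing_by all_goals simp [List.length_drop]

lemma pvRep_go (old new : List Char) (h : old ≠ []) :
    ∀ (fuel : Nat) (l acc : List Char), l.length ≤ fuel →
      PySem.Chars.replace.go old new fuel l acc = acc.reverse ++ pvRep old new l := by
  intro fuel
  induction fuel with
  | zero =>
    intro l acc hl
    have hnil : l = [] := List.eq_nil_of_length_eq_zero (Nat.le_zero.mp hl)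
    subst hnil
    simp [PySem.Chars.replace.go, pvRep]
  | succ n ih =>
    intro l acc hl
    match l with
    | [] => simp [PySem.Chars.replace.go, pvRep]
    | c :: t =>
      rw [PySem.Chars.replace.go]
      by_cases hp : old.isPrefixOf (c :: t) = true
      · simp only [hp, if_true]
        obtain ⟨u, hu⟩ := List.isPrefixOf_iff_prefix.mp hp
        have hlen : old.length + u.length = t.length + 1 := by
          have := congrArg List.length hu; simpa using this
        have hdrop : List.drop old.length (c :: t) = u := by
          rw [← hu]; simp
        have ho : 1 ≤ old.length := List.length_pos_of_ne_nil h
        have hl' : t.length + 1 ≤ n + 1 := by simpa using hl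
        have hdrop2 : t.drop (old.length - 1) = u := by
          cases old with
          | nil => exact absurd rfl h
          | cons o os =>
            have hu' : o :: (os ++ u) = c :: t := by simpa using hu
            have ht : os ++ u = t := (List.cons.injEq _ _ _ _ ▸ hu').2
            simp [← ht]
        rw [hdrop, ih u _ (by omega)]
        rw [pvRep]
        simp [hp, hdrop2]
      · simp only [hp]
        have hl' : t.length + 1 ≤ n + 1 := by simpa using hl
        rw [ih t _ (by omega)]
        rw [pvRep]
        simp [hp]

lemma replace_eq_pvRep (s old new : List Char) (h : old ≠ []) :
    PySem.Chars.replace s old new = pvRep old new s := by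
  rw [PySem.Chars.replace]
  rw [if_neg (by simp [List.isEmpty_iff, h])]
  simpa using pvRep_go old new h s.length s [] le_rfl

lemma pvRep_append (old new t : List Char) (h : old ≠ []) :
    pvRep old new (old ++ t) = new ++ pvRep old new t := by
  cases old with
  | nil => exact absurd rfl h
  | cons o os =>
    rw [List.cons_append, pvRep]
    rw [if_pos (List.isPrefixOf_iff_prefix.mpr ⟨t, by simp⟩)]
    simp

lemma pvRep_cons_neg (old new : List Char) (c : Char) (t : List Char)
    (h : old.isPrefixOf (c :: t) = false) :
    pvRep old new (c :: t) = c :: pvRep old new t := by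
  rw [pvRep, if_neg (by simp [h])]

lemma pvRep_self (old : List Char) (h : old ≠ []) :
    ∀ (n : Nat) (s : List Char), s.length ≤ n → pvRep old old s = s := by
  intro n
  induction n with
  | zero =>
    intro s hs
    have hnil : s = [] := List.eq_nil_of_length_eq_zero (Nat.le_zero.mp hs)
    subst hnil; simp [pvRep]
  | succ n ih =>
    intro s hs
    by_cases hp : old.isPrefixOf s = true
    · obtain ⟨u, hu⟩ := List.isPrefixOf_iff_prefix.mp hp
      have ho : 1 ≤ old.length := List.length_pos_of_ne_nil h
      have hlen : old.length + u.length = s.length := by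
        have := congrArg List.length hu; simpa using this
      rw [← hu, pvRep_append old old u h, ih u (by omega)]
    · match s with
      | [] => simp [pvRep]
      | c :: t =>
        have hl' : t.length + 1 ≤ n + 1 := by simpa using hs
        rw [pvRep_cons_neg _ _ _ _ (eq_false_of_ne_true hp), ih t (by omega)]

-- substituting (b :: nb) for `old` never creates a new prefix w when b ∉ w
lemma pvRep_noCreate (old : List Char) (b : Char) (nb : List Char) :
    ∀ (n : Nat) (s w : List Char), s.length ≤ n → b ∉ w →
      w.isPrefixOf (pvRep old (b :: nb) s) = true → w.isPrefixOf s = true := by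
  intro n
  induction n with
  | zero =>
    intro s w hs hb hw
    have hnil : s = [] := List.eq_nil_of_length_eq_zero (Nat.le_zero.mp hs)
    subst hnil
    simpa [pvRep] using hw
  | succ n ih =>
    intro s w hs hb hw
    match s with
    | [] => simpa [pvRep] using hw
    | c :: t =>
      by_cases hp : old.isPrefixOf (c :: t) = true
      · rw [pvRep, if_pos hp] at hw
        match w with
        | [] => rfl
        | a :: w' =>
          rw [List.cons_append, List.isPrefixOf] at hw
          have hab : a = b := by
            have := (Bool.and_eq_true _ _).mp hw |>.1
            simpa using this
          exact absurd (hab ▸ List.mem_cons_self) hb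
      · rw [pvRep_cons_neg _ _ _ _ (eq_false_of_ne_true hp)] at hw
        match w with
        | [] => rfl
        | a :: w' =>
          rw [List.isPrefixOf] at hw ⊢
          obtain ⟨h1, h2⟩ := (Bool.and_eq_true _ _).mp hw
          have hl' : t.length + 1 ≤ n + 1 := by simpa using hs
          have := ih t w' (by omega) (fun hm => hb (List.mem_cons_of_mem _ hm)) h2
          simp [h1, this]

lemma pvNoCreate1 (s w : List Char) (hb : 'p' ∉ w)
    (h : w.isPrefixOf (pvRep "console.log(".toList "printf(".toList s) = true) :
    w.isPrefixOf s = true := by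
  have hv : "printf(".toList = 'p' :: "rintf(".toList := by simp
  rw [hv] at h
  exact pvRep_noCreate _ 'p' _ s.length s w le_rfl hb h

lemma pvNoCreate2 (s w : List Char) (hb : 'i' ∉ w)
    (h : w.isPrefixOf (pvRep "function main()".toList "int main()".toList s) = true) :
    w.isPrefixOf s = true := by
  have hv : "int main()".toList = 'i' :: "nt main()".toList := by simp
  rw [hv] at h
  exact pvRep_noCreate _ 'i' _ s.length s w le_rfl hb h

-- pass-through lemmas: a replacement/key literal that no other key can match into
lemma pass_k2_v1 (u : List Char) :
    pvRep "function main()".toList "int main()".toList ("printf(".toList ++ u)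
      = "printf(".toList ++ pvRep "function main()".toList "int main()".toList u := by
  simp [pvRep, List.isPrefixOf]

lemma pass_k3_v1 (u : List Char) :
    pvRep "let ".toList "int ".toList ("printf(".toList ++ u)
      = "printf(".toList ++ pvRep "let ".toList "int ".toList u := by
  simp [pvRep, List.isPrefixOf]

lemma pass_k1_K2 (u : List Char) :
    pvRep "console.log(".toList "printf(".toList ("function main()".toList ++ u)
      = "function main()".toList ++ pvRep "console.log(".toList "printf(".toList u := by
  simp [pvRep, List.isPrefixOf]

lemma pass_k3_v2 (u : List Char) :
    pvRep "let ".toList "int ".toList ("int main()".toList ++ u)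
      = "int main()".toList ++ pvRep "let ".toList "int ".toList u := by
  simp [pvRep, List.isPrefixOf]

lemma pass_k1_K3 (u : List Char) :
    pvRep "console.log(".toList "printf(".toList ("let ".toList ++ u)
      = "let ".toList ++ pvRep "console.log(".toList "printf(".toList u := by
  simp [pvRep, List.isPrefixOf]

lemma pass_k2_K3 (u : List Char) :
    pvRep "function main()".toList "int main()".toList ("let ".toList ++ u)
      = "let ".toList ++ pvRep "function main()".toList "int main()".toList u := by
  simp [pvRep, List.isPrefixOf]

-- pvScan equations
lemma pvScan_k1 (u : List Char) :
    pvScan ("console.log(".toList ++ u) = "printf(".toList ++ pvScan u := by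
  rw [show ("console.log(".toList ++ u) = 'c' :: ("onsole.log(".toList ++ u) by simp, pvScan]
  simp [List.isPrefixOf]

lemma pvScan_k2 (u : List Char) :
    pvScan ("function main()".toList ++ u) = "int main()".toList ++ pvScan u := by
  rw [show ("function main()".toList ++ u) = 'f' :: ("unction main()".toList ++ u) by simp, pvScan]
  simp [List.isPrefixOf]

lemma pvScan_k3 (u : List Char) :
    pvScan ("let ".toList ++ u) = "int ".toList ++ pvScan u := by
  rw [show ("let ".toList ++ u) = 'l' :: ("et ".toList ++ u) by simp, pvScan]
  simp [List.isPrefixOf]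

lemma pvScan_cons_neg (c : Char) (t : List Char)
    (h1 : "console.log(".toList.isPrefixOf (c :: t) = false)
    (h2 : "function main()".toList.isPrefixOf (c :: t) = false)
    (h3 : "let ".toList.isPrefixOf (c :: t) = false) :
    pvScan (c :: t) = c :: pvScan t := by
  rw [pvScan]
  simp only [h1, h2, h3, Bool.false_eq_true, if_false]

-- the heart: three sequential replaces equal one combined scan
lemma pvMain : ∀ (n : Nat) (s : List Char), s.length ≤ n →
    pvRep "let ".toList "int ".toList
      (pvRep "function main()".toList "int main()".toList
        (pvRep "console.log(".toList "printf(".toList s)) = pvScan s := by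
  intro n
  induction n with
  | zero =>
    intro s hs
    have hnil : s = [] := List.eq_nil_of_length_eq_zero (Nat.le_zero.mp hs)
    subst hnil; simp [pvRep, pvScan]
  | succ n ih =>
    intro s hs
    by_cases h1 : "console.log(".toList.isPrefixOf s = true
    · obtain ⟨u, hu⟩ := List.isPrefixOf_iff_prefix.mp h1
      have hlen : u.length ≤ n := by
        have := congrArg List.length hu; simp at this; omega
      rw [← hu, pvRep_append _ _ _ (by simp), pass_k2_v1, pass_k3_v1, ih u hlen, pvScan_k1]
    · by_cases h2 : "function main()".toList.isPrefixOf s = true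
      · obtain ⟨u, hu⟩ := List.isPrefixOf_iff_prefix.mp h2
        have hlen : u.length ≤ n := by
          have := congrArg List.length hu; simp at this; omega
        rw [← hu, pass_k1_K2, pvRep_append _ _ _ (by simp), pass_k3_v2, ih u hlen, pvScan_k2]
      · by_cases h3 : "let ".toList.isPrefixOf s = true
        · obtain ⟨u, hu⟩ := List.isPrefixOf_iff_prefix.mp h3
          have hlen : u.length ≤ n := by
            have := congrArg List.length hu; simp at this; omega
          rw [← hu, pass_k1_K3, pass_k2_K3, pvRep_append _ _ _ (by simp), ih u hlen, pvScan_k3]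
        · match s with
          | [] => simp [pvRep, pvScan]
          | c :: t =>
            have e1 : pvRep "console.log(".toList "printf(".toList (c :: t)
                = c :: pvRep "console.log(".toList "printf(".toList t :=
              pvRep_cons_neg _ _ _ _ (eq_false_of_ne_true h1)
            have h2' : "function main()".toList.isPrefixOf
                (c :: pvRep "console.log(".toList "printf(".toList t) = false := by
              apply eq_false_of_ne_true; intro hcon
              exact h2 (pvNoCreate1 (c :: t) _ (by decide) (e1 ▸ hcon))
            have e2 : pvRep "function main()".toList "int main()".toList
                (c :: pvRep "console.log(".toList "printf(".toList t)
                = c :: pvRep "function main()".toList "int main()".toList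
                    (pvRep "console.log(".toList "printf(".toList t) :=
              pvRep_cons_neg _ _ _ _ h2'
            have h3' : "let ".toList.isPrefixOf
                (c :: pvRep "function main()".toList "int main()".toList
                  (pvRep "console.log(".toList "printf(".toList t)) = false := by
              apply eq_false_of_ne_true; intro hcon
              have step : "let ".toList.isPrefixOf
                  (pvRep "function main()".toList "int main()".toList
                    (pvRep "console.log(".toList "printf(".toList (c :: t))) = true := by
                rw [e1, ← e2] at *
                exact hcon
              have := pvNoCreate2 _ _ (by decide) step
              exact h3 (pvNoCreate1 (c :: t) _ (by decide) this)
            have hl' : t.length + 1 ≤ n + 1 := by simpa using hs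
            rw [e1, e2, pvRep_cons_neg _ _ _ _ h3', ih t (by omega),
              pvScan_cons_neg c t (eq_false_of_ne_true h1) (eq_false_of_ne_true h2)
                (eq_false_of_ne_true h3)]

-- per-line: A's five replace passes equal B's single scan
lemma pvLine (line : String) :
    [("console.log(", "printf("), ("function main()", "int main()"),
     ("let ", "int "), ("const ", "const "), (";", ";")].foldl
      (fun l p => PySem.Str.replace l p.1 p.2) line
    = String.ofList (pvScan line.toList) := by
  apply String.toList_inj.mp
  simp only [List.foldl, PySem.Str.toList_replace, String.toList_ofList]
  rw [replace_eq_pvRep _ _ _ (by simp), replace_eq_pvRep _ _ _ (by simp),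
      replace_eq_pvRep _ _ _ (by simp), replace_eq_pvRep _ _ _ (by simp),
      replace_eq_pvRep _ _ _ (by simp)]
  rw [pvRep_self _ (by simp) _ _ le_rfl, pvRep_self _ (by simp) _ _ le_rfl]
  exact pvMain _ line.toList le_rfl

-- the same, phrased on A's replacement dict
lemma pvDictLine (line : String) :
    (((((PySem.Dict.empty.insert "console.log(" "printf(").insert
        "function main()" "int main()").insert
        "let " "int ").insert
        "const " "const ").insert
        ";" ";" : PySem.Dict String String).items.foldl
      (fun l p => PySem.Str.replace l p.1 p.2) line
    = String.ofList (pvScan line.toList) := by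
  have h : (((((PySem.Dict.empty.insert "console.log(" "printf(").insert
        "function main()" "int main()").insert
        "let " "int ").insert
        "const " "const ").insert
        ";" ";" : PySem.Dict String String).items
      = [("console.log(", "printf("), ("function main()", "int main()"),
         ("let ", "int "), ("const ", "const "), (";", ";")] := rfl
  rw [h, pvLine]


-- ===== VERDICT (by name: the statement is the Claim_ definition above) =====
theorem js_to_c_spec : Claim_equal_js_to_c := by
  intro js_code _
  unfold Spec_js_to_c
  simp only [js_to_c, js_to_c_alt]
  rw [PySem.List.foldl_append_singleton_eq_map]
  simp only [List.nil_append]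
  exact congrArg (PySem.Str.join "\n")
    (List.map_congr_left (fun line _ => by rw [pvDictLine line]))
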